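-- pv_equiv track=rewrite | github.com/VogueC315/Xiangqi | Code_plateau_echecs_chinois.py | is_path_clear
-- ===== SOURCE A (Python) =====
-- def is_path_clear(start_pos, end_pos, board):
--     start_col, start_row = start_pos
--     end_col, end_row = end_pos
--
--     # Cas où le mouvement est vertical (colonne inchangée)
--     if start_col == end_col:
--         step = 1 if start_row < end_row else -1
--         for row in range(start_row + step, end_row, step):
--             if board[start_col][row] is not None:
--                 return False
--
--     # Cas où le mouvement est horizontal (ligne inchangée)
--     elif start_row == end_row:
--         step = 1 if start_col < end_col else -1
--         for col in range(start_col + step, end_col, step):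
--             if board[col][start_row] is not None:
--                 return False
--
--     # Cas où le mouvement est diagonal
--     elif abs(end_col - start_col) == abs(end_row - start_row):
--         step_col = 1 if end_col > start_col else -1
--         step_row = 1 if end_row > start_row else -1
--         for col, row in zip(range(start_col + step_col, end_col, step_col), range(start_row + step_row, end_row, step_row)):
--             if board[col][row] is not None:
--                 return False
--
--     # Si aucune pièce n'est sur le chemin, le chemin est dégagé
--     return True
-- ===== SOURCE B (Python) =====
-- def is_path_clear(start_pos, end_pos, board):
--     # Board-driven scan: instead of walking the path, test every occupied board
--     # cell for lying strictly between start and end on the move's line.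
--     start_col, start_row = start_pos
--     end_col, end_row = end_pos
--     dc = end_col - start_col
--     dr = end_row - start_row
--     if dc != 0 and dr != 0 and abs(dc) != abs(dr):
--         return True  # not a straight or diagonal move: nothing lies on the path
--     for c, column in enumerate(board):
--         for r, v in enumerate(column):
--             if (v is not None
--                     and dr * (c - start_col) == dc * (r - start_row)
--                     and min(start_col, end_col) <= c <= max(start_col, end_col)
--                     and min(start_row, end_row) <= r <= max(start_row, end_row)
--                     and (c, r) != (start_col, start_row)
--                     and (c, r) != (end_col, end_row)):
--                 return False
--     return True
-- ===== Notes on version B (the rewrite author's own statement) =====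
-- stated objective: alternative
-- what changed: Instead of walking the path cells one step at a time as A does, B scans the whole board with enumerate and returns False on any occupied cell that satisfies a geometric betweenness test (collinear with start-end and inside the bounding box, endpoints excluded); the per-step index walk disappears.
-- outside the precondition, e.g. on is_path_clear((0, -3), (0, 0), [[None, 1, None]]): A returns False, B returns True
import Mathlib
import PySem

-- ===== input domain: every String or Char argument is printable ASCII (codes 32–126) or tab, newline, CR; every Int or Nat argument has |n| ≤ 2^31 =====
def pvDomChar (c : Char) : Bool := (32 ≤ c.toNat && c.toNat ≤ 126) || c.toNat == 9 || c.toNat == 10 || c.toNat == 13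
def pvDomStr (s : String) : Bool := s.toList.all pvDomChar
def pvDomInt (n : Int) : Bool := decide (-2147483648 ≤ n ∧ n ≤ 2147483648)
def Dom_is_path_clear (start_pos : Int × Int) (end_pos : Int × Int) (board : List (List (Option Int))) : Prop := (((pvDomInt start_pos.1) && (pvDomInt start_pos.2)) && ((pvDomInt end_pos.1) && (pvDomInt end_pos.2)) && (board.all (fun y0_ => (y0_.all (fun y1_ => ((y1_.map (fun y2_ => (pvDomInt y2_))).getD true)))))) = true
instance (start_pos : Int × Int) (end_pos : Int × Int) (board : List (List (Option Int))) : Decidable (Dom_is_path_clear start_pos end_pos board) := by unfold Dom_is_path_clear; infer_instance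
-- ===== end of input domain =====

-- B replaces A's cell-by-cell path walk by a whole-board scan with a geometric
-- betweenness test on each occupied cell (objective: alternative algorithm).

-- board[c][r] as Python A accesses it (negative-index wrap via pyGet?); an
-- out-of-range access (IndexError in Python) yields `none` here — excluded by Pre_.
def pvCell (board : List (List (Option Int))) (c r : Int) : Option Int :=
  (PySem.List.pyGet? ((PySem.List.pyGet? board c).getD []) r).getD none

-- ===== PORT A =====
def is_path_clear (start_pos : Int × Int) (end_pos : Int × Int) (board : List (List (Option Int))) : Bool :=
  let start_col := start_pos.1; let start_row := start_pos.2
  let end_col := end_pos.1; let end_row := end_pos.2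
  if start_col == end_col then
    let step : Int := if start_row < end_row then 1 else -1
    (PySem.List.pyRange (start_row + step) end_row step).all
      (fun row => pvCell board start_col row == none)
  else if start_row == end_row then
    let step : Int := if start_col < end_col then 1 else -1
    (PySem.List.pyRange (start_col + step) end_col step).all
      (fun col => pvCell board col start_row == none)
  else if (end_col - start_col).natAbs == (end_row - start_row).natAbs then
    let step_col : Int := if end_col > start_col then 1 else -1
    let step_row : Int := if end_row > start_row then 1 else -1
    ((PySem.List.pyRange (start_col + step_col) end_col step_col).zip
       (PySem.List.pyRange (start_row + step_row) end_row step_row)).all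
      (fun p => pvCell board p.1 p.2 == none)
  else
    true

-- ===== PORT B =====
def is_path_clear_alt (start_pos : Int × Int) (end_pos : Int × Int) (board : List (List (Option Int))) : Bool :=
  let sc := start_pos.1; let sr := start_pos.2
  let ec := end_pos.1; let er := end_pos.2
  let dc := ec - sc
  let dr := er - sr
  if dc != 0 && dr != 0 && dc.natAbs != dr.natAbs then
    true
  else
    (PySem.List.enumerate board 0).all (fun p =>
      (PySem.List.enumerate p.2 0).all (fun q =>
        !(q.2.isSome
          && (dr * (p.1 - sc) == dc * (q.1 - sr))
          && (decide (min sc ec ≤ p.1) && decide (p.1 ≤ max sc ec))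
          && (decide (min sr er ≤ q.1) && decide (q.1 ≤ max sr er))
          && !((p.1 == sc) && (q.1 == sr))
          && !((p.1 == ec) && (q.1 == er)))))

-- ===== PRECONDITION & SPEC =====
-- the straight-line cells strictly between start and end that Python A indexes
def pvPath (sp ep : Int × Int) : List (Int × Int) :=
  if ep.1 - sp.1 = 0 ∨ ep.2 - sp.2 = 0 ∨ (ep.1 - sp.1).natAbs = (ep.2 - sp.2).natAbs then
    (PySem.List.pyRange 1 ((max (ep.1 - sp.1).natAbs (ep.2 - sp.2).natAbs : Nat) : Int) 1).map
      (fun i => (sp.1 + (ep.1 - sp.1).sign * i, sp.2 + (ep.2 - sp.2).sign * i))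
  else []

-- Pre_ restricts to the game's natural board domain: every cell strictly between
-- start and end on a straight/diagonal move has nonnegative in-range coordinates;
-- excluded are moves whose intermediate cells fall off the board (Python raises
-- IndexError) or carry negative coordinates (Python A reads wrapped cells there).
def Pre_is_path_clear (start_pos : Int × Int) (end_pos : Int × Int) (board : List (List (Option Int))) : Prop :=
  ∀ p ∈ pvPath start_pos end_pos,
    0 ≤ p.1 ∧ p.1 < board.length ∧ 0 ≤ p.2 ∧ p.2 < (board.getD p.1.toNat []).length
instance (start_pos : Int × Int) (end_pos : Int × Int) (board : List (List (Option Int))) : Decidable (Pre_is_path_clear start_pos end_pos board) := by unfold Pre_is_path_clear; infer_instance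

def pvWitness_is_path_clear : (Int × Int) × (Int × Int) × List (List (Option Int)) :=
  ((0, 0), (2, 2), [[none, none, none], [none, some 1, none], [none, none, none]])

def Spec_is_path_clear (start_pos : Int × Int) (end_pos : Int × Int) (board : List (List (Option Int))) (out : Bool) : Prop := out = is_path_clear_alt start_pos end_pos board
instance (start_pos : Int × Int) (end_pos : Int × Int) (board : List (List (Option Int))) (out : Bool) : Decidable (Spec_is_path_clear start_pos end_pos board out) := by unfold Spec_is_path_clear; infer_instance

-- ===== CLAIM (what is proved, stated in full; the proofs are below) =====
def Claim_equal_is_path_clear : Prop := ∀ (start_pos : Int × Int) (end_pos : Int × Int) (board : List (List (Option Int))), Dom_is_path_clear start_pos end_pos board → Pre_is_path_clear start_pos end_pos board → Spec_is_path_clear start_pos end_pos board (is_path_clear start_pos end_pos board)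

-- ===== LEMMAS AND PROOFS =====

-- A's result written as "every cell of pvPath is empty"
def pvPathAll (sp ep : Int × Int) (board : List (List (Option Int))) : Bool :=
  (pvPath sp ep).all (fun p => pvCell board p.1 p.2 == none)

-- an ascending run re-based at 1
lemma pyRange_up (a b : Int) :
    PySem.List.pyRange (a + 1) b 1 = (PySem.List.pyRange 1 (b - a) 1).map (fun i => a + i) := by
  simp only [PySem.List.pyRange_one, List.map_map]
  have h : (b - (a + 1)).toNat = (b - a - 1).toNat := by omega
  rw [h]; congr 1; funext k; simp; ring

-- a descending run re-based at 1
lemma pyRange_down (a b : Int) :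
    PySem.List.pyRange (a - 1) b (-1) = (PySem.List.pyRange 1 (a - b) 1).map (fun i => a - i) := by
  simp only [PySem.List.pyRange_neg_one, PySem.List.pyRange_one, List.map_map]
  have h : (a - 1 - b).toNat = (a - b - 1).toNat := by omega
  rw [h]; congr 1; funext k; simp; ring

theorem A_eq_pathAll (start_pos end_pos : Int × Int) (board : List (List (Option Int))) :
    is_path_clear start_pos end_pos board = pvPathAll start_pos end_pos board := by
  obtain ⟨sc, sr⟩ := start_pos
  obtain ⟨ec, er⟩ := end_pos
  simp only [is_path_clear, pvPathAll, pvPath]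
  by_cases hc : sc = ec
  · subst hc
    simp only [beq_self_eq_true, if_true, sub_self, Int.sign_zero]
    simp only [true_or, if_true]
    rw [List.all_map]
    by_cases hr : sr = er
    · subst hr
      simp [PySem.List.pyRange_neg_one_eq_nil, PySem.List.pyRange_one_eq_nil]
    · rcases lt_or_gt_of_ne hr with h | h
      · have hn : (((max (0:Int).natAbs (er - sr).natAbs : Nat)) : Int) = er - sr := by omega
        simp only [if_pos h, hn,
          Int.sign_eq_one_iff_pos.mpr (show (0:Int) < er - sr by omega)]
        rw [pyRange_up sr er, List.all_map]
        congr 1; funext i; simp only [Function.comp_apply]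
        rw [show sc + (0:Int) * i = sc from by ring, show sr + (1:Int) * i = sr + i from by ring]
      · have hn : (((max (0:Int).natAbs (er - sr).natAbs : Nat)) : Int) = sr - er := by omega
        simp only [if_neg (show ¬ sr < er by omega), hn,
          Int.sign_eq_neg_one_iff_neg.mpr (show er - sr < 0 by omega)]
        rw [show sr + (-1 : Int) = sr - 1 from by ring, pyRange_down sr er, List.all_map]
        congr 1; funext i; simp only [Function.comp_apply]
        rw [show sc + (0:Int) * i = sc from by ring, show sr + (-1:Int) * i = sr - i from by ring]
  · by_cases hr : sr = er
    · subst hr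
      have hcc : (sc == ec) = false := by simp [hc]
      simp only [hcc, Bool.false_eq_true, if_false, beq_self_eq_true, if_true, sub_self,
        Int.sign_zero]
      simp only [true_or, or_true, if_true]
      rw [List.all_map]
      rcases lt_or_gt_of_ne hc with h | h
      · have hn : (((max (ec - sc).natAbs (0:Int).natAbs : Nat)) : Int) = ec - sc := by omega
        simp only [if_pos h, hn,
          Int.sign_eq_one_iff_pos.mpr (show (0:Int) < ec - sc by omega)]
        rw [pyRange_up sc ec, List.all_map]
        congr 1; funext i; simp only [Function.comp_apply]
        rw [show sc + (1:Int) * i = sc + i from by ring, show sr + (0:Int) * i = sr from by ring]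
      · have hn : (((max (ec - sc).natAbs (0:Int).natAbs : Nat)) : Int) = sc - ec := by omega
        simp only [if_neg (show ¬ sc < ec by omega), hn,
          Int.sign_eq_neg_one_iff_neg.mpr (show ec - sc < 0 by omega)]
        rw [show sc + (-1 : Int) = sc - 1 from by ring, pyRange_down sc ec, List.all_map]
        congr 1; funext i; simp only [Function.comp_apply]
        rw [show sc + (-1:Int) * i = sc - i from by ring, show sr + (0:Int) * i = sr from by ring]
    · have hcc : (sc == ec) = false := by simp [hc]
      have hrr : (sr == er) = false := by simp [hr]
      simp only [hcc, hrr, Bool.false_eq_true, if_false]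
      by_cases hd : (ec - sc).natAbs = (er - sr).natAbs
      · simp only [hd, beq_self_eq_true, if_true, max_self]
        simp only [or_true, if_true]
        rw [List.all_map]
        rcases lt_or_gt_of_ne hc with h1 | h1 <;> rcases lt_or_gt_of_ne hr with h2 | h2
        · have hn : (((er - sr).natAbs : Nat) : Int) = ec - sc := by omega
          have hm : er - sr = ec - sc := by omega
          simp only [if_pos (show ec > sc from h1), if_pos (show er > sr from h2), hn,
            Int.sign_eq_one_iff_pos.mpr (show (0:Int) < ec - sc by omega),
            Int.sign_eq_one_iff_pos.mpr (show (0:Int) < er - sr by omega)]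
          rw [pyRange_up sc ec, pyRange_up sr er, hm, List.zip_map', List.all_map]
          congr 1; funext i; simp only [Function.comp_apply]
          rw [show sc + (1:Int) * i = sc + i from by ring, show sr + (1:Int) * i = sr + i from by ring]
        · have hn : (((er - sr).natAbs : Nat) : Int) = ec - sc := by omega
          have hm : sr - er = ec - sc := by omega
          simp only [if_pos (show ec > sc from h1), if_neg (show ¬ er > sr by omega), hn,
            Int.sign_eq_one_iff_pos.mpr (show (0:Int) < ec - sc by omega),
            Int.sign_eq_neg_one_iff_neg.mpr (show er - sr < 0 by omega)]
          rw [show sr + (-1 : Int) = sr - 1 from by ring, pyRange_up sc ec, pyRange_down sr er,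
            hm, List.zip_map', List.all_map]
          congr 1; funext i; simp only [Function.comp_apply]
          rw [show sc + (1:Int) * i = sc + i from by ring, show sr + (-1:Int) * i = sr - i from by ring]
        · have hn : (((er - sr).natAbs : Nat) : Int) = sc - ec := by omega
          have hm : er - sr = sc - ec := by omega
          simp only [if_neg (show ¬ ec > sc by omega), if_pos (show er > sr from h2), hn,
            Int.sign_eq_neg_one_iff_neg.mpr (show ec - sc < 0 by omega),
            Int.sign_eq_one_iff_pos.mpr (show (0:Int) < er - sr by omega)]
          rw [show sc + (-1 : Int) = sc - 1 from by ring, pyRange_down sc ec, pyRange_up sr er,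
            hm, List.zip_map', List.all_map]
          congr 1; funext i; simp only [Function.comp_apply]
          rw [show sc + (-1:Int) * i = sc - i from by ring, show sr + (1:Int) * i = sr + i from by ring]
        · have hn : (((er - sr).natAbs : Nat) : Int) = sc - ec := by omega
          have hm : sr - er = sc - ec := by omega
          simp only [if_neg (show ¬ ec > sc by omega), if_neg (show ¬ er > sr by omega), hn,
            Int.sign_eq_neg_one_iff_neg.mpr (show ec - sc < 0 by omega),
            Int.sign_eq_neg_one_iff_neg.mpr (show er - sr < 0 by omega)]
          rw [show sc + (-1 : Int) = sc - 1 from by ring, show sr + (-1 : Int) = sr - 1 from by ring,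
            pyRange_down sc ec, pyRange_down sr er, hm, List.zip_map', List.all_map]
          congr 1; funext i; simp only [Function.comp_apply]
          rw [show sc + (-1:Int) * i = sc - i from by ring, show sr + (-1:Int) * i = sr - i from by ring]
      · rw [if_neg (show ¬(ec - sc = 0 ∨ er - sr = 0 ∨ (ec - sc).natAbs = (er - sr).natAbs) by omega)]
        simp [hd]

-- the geometric betweenness test picks out exactly the pvPath cells
theorem mem_path_iff (sc sr ec er : Int)
    (hline : ec - sc = 0 ∨ er - sr = 0 ∨ (ec - sc).natAbs = (er - sr).natAbs) (c r : Int) :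
    (c, r) ∈ pvPath (sc, sr) (ec, er) ↔
      ((er - sr) * (c - sc) = (ec - sc) * (r - sr) ∧ min sc ec ≤ c ∧ c ≤ max sc ec ∧
       min sr er ≤ r ∧ r ≤ max sr er ∧ ¬(c = sc ∧ r = sr) ∧ ¬(c = ec ∧ r = er)) := by
  simp only [pvPath]
  rw [if_pos hline]
  simp only [List.mem_map, PySem.List.mem_pyRange_one, Prod.mk.injEq]
  by_cases h0 : ec - sc = 0
  · by_cases h0' : er - sr = 0
    · -- degenerate: start = end
      constructor
      · rintro ⟨i, ⟨h1, h2⟩, _, _⟩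
        rw [h0, h0'] at h2; simp at h2; omega
      · rintro ⟨_, hb1, hb2, hb3, hb4, hne, _⟩
        exact absurd ⟨by omega, by omega⟩ hne
    · -- vertical move
      have hsc : (ec - sc).sign = 0 := by rw [h0]; rfl
      rcases lt_or_gt_of_ne (fun h : er - sr = 0 => h0' h) with hneg | hpos
      · have hs : (er - sr).sign = -1 := Int.sign_eq_neg_one_iff_neg.mpr hneg
        have hcast : (((max (ec - sc).natAbs (er - sr).natAbs : Nat)) : Int) = sr - er := by omega
        rw [hsc, hs, hcast]
        constructor
        · rintro ⟨i, ⟨h1, h2⟩, hcc, hrr⟩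
          have hc' : c = sc := by omega
          have hr' : r = sr - i := by omega
          refine ⟨?_, by omega, by omega, by omega, by omega, fun h => by omega, fun h => by omega⟩
          rw [h0, show c - sc = 0 by omega]; ring
        · rintro ⟨hcol, hb1, hb2, hb3, hb4, hne1, hne2⟩
          rw [h0] at hcol; simp at hcol
          have hc' : c = sc := by
            rcases hcol with h | h
            · omega
            · omega
          exact ⟨sr - r, ⟨by omega, by omega⟩, by omega, by omega⟩
      · have hs : (er - sr).sign = 1 := Int.sign_eq_one_iff_pos.mpr hpos
        have hcast : (((max (ec - sc).natAbs (er - sr).natAbs : Nat)) : Int) = er - sr := by omega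
        rw [hsc, hs, hcast]
        constructor
        · rintro ⟨i, ⟨h1, h2⟩, hcc, hrr⟩
          have hc' : c = sc := by omega
          refine ⟨?_, by omega, by omega, by omega, by omega, fun h => by omega, fun h => by omega⟩
          rw [h0, show c - sc = 0 by omega]; ring
        · rintro ⟨hcol, hb1, hb2, hb3, hb4, hne1, hne2⟩
          rw [h0] at hcol; simp at hcol
          have hc' : c = sc := by
            rcases hcol with h | h
            · omega
            · omega
          exact ⟨r - sr, ⟨by omega, by omega⟩, by omega, by omega⟩
  · by_cases h0' : er - sr = 0
    · -- horizontal move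
      have hsr : (er - sr).sign = 0 := by rw [h0']; rfl
      rcases lt_or_gt_of_ne (fun h : ec - sc = 0 => h0 h) with hneg | hpos
      · have hs : (ec - sc).sign = -1 := Int.sign_eq_neg_one_iff_neg.mpr hneg
        have hcast : (((max (ec - sc).natAbs (er - sr).natAbs : Nat)) : Int) = sc - ec := by omega
        rw [hsr, hs, hcast]
        constructor
        · rintro ⟨i, ⟨h1, h2⟩, hcc, hrr⟩
          have hr' : r = sr := by omega
          refine ⟨?_, by omega, by omega, by omega, by omega, fun h => by omega, fun h => by omega⟩
          rw [h0', show r - sr = 0 by omega]; ring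
        · rintro ⟨hcol, hb1, hb2, hb3, hb4, hne1, hne2⟩
          rw [h0'] at hcol; simp at hcol
          have hr' : r = sr := by
            rcases hcol with h | h
            · omega
            · omega
          exact ⟨sc - c, ⟨by omega, by omega⟩, by omega, by omega⟩
      · have hs : (ec - sc).sign = 1 := Int.sign_eq_one_iff_pos.mpr hpos
        have hcast : (((max (ec - sc).natAbs (er - sr).natAbs : Nat)) : Int) = ec - sc := by omega
        rw [hsr, hs, hcast]
        constructor
        · rintro ⟨i, ⟨h1, h2⟩, hcc, hrr⟩
          have hr' : r = sr := by omega
          refine ⟨?_, by omega, by omega, by omega, by omega, fun h => by omega, fun h => by omega⟩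
          rw [h0', show r - sr = 0 by omega]; ring
        · rintro ⟨hcol, hb1, hb2, hb3, hb4, hne1, hne2⟩
          rw [h0'] at hcol; simp at hcol
          have hr' : r = sr := by
            rcases hcol with h | h
            · omega
            · omega
          exact ⟨c - sc, ⟨by omega, by omega⟩, by omega, by omega⟩
    · -- diagonal move
      have hd : (ec - sc).natAbs = (er - sr).natAbs := by tauto
      rcases lt_or_gt_of_ne (fun h : ec - sc = 0 => h0 h) with hcneg | hcpos <;>
        rcases lt_or_gt_of_ne (fun h : er - sr = 0 => h0' h) with hrneg | hrpos
      · -- dc < 0, dr < 0 : er - sr = ec - sc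
        have heq : er - sr = ec - sc := by omega
        have hcast : (((max (ec - sc).natAbs (er - sr).natAbs : Nat)) : Int) = sc - ec := by omega
        rw [Int.sign_eq_neg_one_iff_neg.mpr hcneg, Int.sign_eq_neg_one_iff_neg.mpr hrneg, hcast]
        constructor
        · rintro ⟨i, ⟨h1, h2⟩, hcc, hrr⟩
          refine ⟨?_, by omega, by omega, by omega, by omega, fun h => by omega, fun h => by omega⟩
          rw [show c - sc = -i by omega, show r - sr = -i by omega, heq]
        · rintro ⟨hcol, hb1, hb2, hb3, hb4, hne1, hne2⟩
          rw [heq] at hcol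
          have hlin : c - sc = r - sr := mul_left_cancel₀ (by omega) hcol
          exact ⟨sc - c, ⟨by omega, by omega⟩, by omega, by omega⟩
      · -- dc < 0, dr > 0 : er - sr = -(ec - sc)
        have heq : er - sr = -(ec - sc) := by omega
        have hcast : (((max (ec - sc).natAbs (er - sr).natAbs : Nat)) : Int) = sc - ec := by omega
        rw [Int.sign_eq_neg_one_iff_neg.mpr hcneg, Int.sign_eq_one_iff_pos.mpr hrpos, hcast]
        constructor
        · rintro ⟨i, ⟨h1, h2⟩, hcc, hrr⟩
          refine ⟨?_, by omega, by omega, by omega, by omega, fun h => by omega, fun h => by omega⟩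
          rw [show c - sc = -i by omega, show r - sr = i by omega, heq]; ring
        · rintro ⟨hcol, hb1, hb2, hb3, hb4, hne1, hne2⟩
          have hsum : (ec - sc) * ((r - sr) + (c - sc)) = 0 := by
            calc (ec - sc) * ((r - sr) + (c - sc))
                = (ec - sc) * (r - sr) + (ec - sc) * (c - sc) := by ring
              _ = (er - sr) * (c - sc) + (ec - sc) * (c - sc) := by rw [hcol]
              _ = 0 := by rw [heq]; ring
          have hlin : r - sr = -(c - sc) := by
            rcases mul_eq_zero.mp hsum with h | h
            · omega
            · omega
          exact ⟨sc - c, ⟨by omega, by omega⟩, by omega, by omega⟩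
      · -- dc > 0, dr < 0 : er - sr = -(ec - sc)
        have heq : er - sr = -(ec - sc) := by omega
        have hcast : (((max (ec - sc).natAbs (er - sr).natAbs : Nat)) : Int) = ec - sc := by omega
        rw [Int.sign_eq_one_iff_pos.mpr hcpos, Int.sign_eq_neg_one_iff_neg.mpr hrneg, hcast]
        constructor
        · rintro ⟨i, ⟨h1, h2⟩, hcc, hrr⟩
          refine ⟨?_, by omega, by omega, by omega, by omega, fun h => by omega, fun h => by omega⟩
          rw [show c - sc = i by omega, show r - sr = -i by omega, heq]; ring
        · rintro ⟨hcol, hb1, hb2, hb3, hb4, hne1, hne2⟩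
          have hsum : (ec - sc) * ((r - sr) + (c - sc)) = 0 := by
            calc (ec - sc) * ((r - sr) + (c - sc))
                = (ec - sc) * (r - sr) + (ec - sc) * (c - sc) := by ring
              _ = (er - sr) * (c - sc) + (ec - sc) * (c - sc) := by rw [hcol]
              _ = 0 := by rw [heq]; ring
          have hlin : r - sr = -(c - sc) := by
            rcases mul_eq_zero.mp hsum with h | h
            · omega
            · omega
          exact ⟨c - sc, ⟨by omega, by omega⟩, by omega, by omega⟩
      · -- dc > 0, dr > 0 : er - sr = ec - sc
        have heq : er - sr = ec - sc := by omega
        have hcast : (((max (ec - sc).natAbs (er - sr).natAbs : Nat)) : Int) = ec - sc := by omega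
        rw [Int.sign_eq_one_iff_pos.mpr hcpos, Int.sign_eq_one_iff_pos.mpr hrpos, hcast]
        constructor
        · rintro ⟨i, ⟨h1, h2⟩, hcc, hrr⟩
          refine ⟨?_, by omega, by omega, by omega, by omega, fun h => by omega, fun h => by omega⟩
          rw [show c - sc = i by omega, show r - sr = i by omega, heq]
        · rintro ⟨hcol, hb1, hb2, hb3, hb4, hne1, hne2⟩
          rw [heq] at hcol
          have hlin : c - sc = r - sr := mul_left_cancel₀ (by omega) hcol
          exact ⟨c - sc, ⟨by omega, by omega⟩, by omega, by omega⟩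

lemma pvCell_natCast (board : List (List (Option Int))) (k m : Nat)
    (hk : k < board.length) (hm : m < board[k].length) :
    pvCell board (k : Int) (m : Int) = board[k][m] := by
  simp [pvCell, PySem.List.pyGet?_natCast, List.getElem?_eq_getElem hk,
    List.getElem?_eq_getElem hm]

theorem AB_eq (start_pos end_pos : Int × Int) (board : List (List (Option Int)))
    (hpre : Pre_is_path_clear start_pos end_pos board) :
    is_path_clear start_pos end_pos board = is_path_clear_alt start_pos end_pos board := by
  rw [A_eq_pathAll]
  obtain ⟨sc, sr⟩ := start_pos
  obtain ⟨ec, er⟩ := end_pos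
  by_cases hline : ec - sc = 0 ∨ er - sr = 0 ∨ (ec - sc).natAbs = (er - sr).natAbs
  · have hbool : ((ec - sc != 0) && (er - sr != 0) && ((ec - sc).natAbs != (er - sr).natAbs)) = false := by
      rcases hline with h | h | h <;> simp [h]
    simp only [is_path_clear_alt, hbool, Bool.false_eq_true, if_false]
    unfold pvPathAll
    refine Bool.eq_iff_iff.mpr ?_
    simp only [List.all_eq_true]
    constructor
    · intro hA p hp q hq
      rw [PySem.List.mem_enumerate_iff] at hp
      obtain ⟨k, hk, rfl⟩ := hp
      rw [PySem.List.mem_enumerate_iff] at hq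
      obtain ⟨m, hm, rfl⟩ := hq
      simp only [zero_add] at *
      by_cases hbet : ((k : Int), (m : Int)) ∈ pvPath (sc, sr) (ec, er)
      · have := hA _ hbet
        rw [pvCell_natCast board k m hk hm] at this
        rw [beq_iff_eq] at this
        simp [this]
      · rw [Bool.not_eq_true', Bool.eq_false_iff]
        intro hX
        simp only [Bool.and_eq_true, beq_iff_eq, decide_eq_true_iff, Bool.not_eq_true',
          Bool.and_eq_false_iff, beq_eq_false_iff_ne, ne_eq] at hX
        exact hbet ((mem_path_iff sc sr ec er hline (k : Int) (m : Int)).mpr (by tauto))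
    · intro hB p hp
      obtain ⟨c, r⟩ := p
      have hmem := (mem_path_iff sc sr ec er hline c r).mp hp
      have hdom := hpre (c, r) hp
      simp only at hdom
      obtain ⟨hc0, hc1, hr0, hr1⟩ := hdom
      have hk : c.toNat < board.length := by omega
      have hrow : board.getD c.toNat [] = board[c.toNat] := by
        rw [List.getD_eq_getElem?_getD, List.getElem?_eq_getElem hk]; rfl
      have hm : r.toNat < board[c.toNat].length := by rw [← hrow]; omega
      have hB1 := hB ((c.toNat : Int), board[c.toNat])
        (by rw [PySem.List.mem_enumerate_iff]; exact ⟨c.toNat, hk, by simp⟩)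
      have hB2 := hB1 ((r.toNat : Int), board[c.toNat][r.toNat])
        (by rw [PySem.List.mem_enumerate_iff]; exact ⟨r.toNat, hm, by simp⟩)
      simp only at hB2
      cases hval : board[c.toNat][r.toNat] with
      | none =>
        show (pvCell board c r == none) = true
        rw [beq_iff_eq, show c = (c.toNat : Int) by omega, show r = (r.toNat : Int) by omega,
          pvCell_natCast board c.toNat r.toNat hk hm, hval]
      | some v =>
        exfalso
        rw [show ((c.toNat : Nat) : Int) = c by omega, show ((r.toNat : Nat) : Int) = r by omega,
          hval] at hB2
        simp at hB2
        obtain ⟨h1, h2, h3, h4, h5, h6, h7⟩ := hmem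
        rcases hB2 with ((((h | h) | h) | h) | h)
        · exact h h1
        · omega
        · omega
        · exact h6 h
        · exact h7 h
  · simp [is_path_clear_alt, pvPathAll, pvPath, show ec - sc ≠ 0 by omega,
      show er - sr ≠ 0 by omega, show (ec - sc).natAbs ≠ (er - sr).natAbs by omega]

-- ===== VERDICT (by name: the statement is the Claim_ definition above) =====
theorem is_path_clear_spec : Claim_equal_is_path_clear := by
  intro sp ep board _ hpre
  unfold Spec_is_path_clear
  exact AB_eq sp ep board hpre
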